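-- pv_equiv track=rewrite | github.com/Balut-moko/procon-grassmaker-archive | atcoder/arc173/arc173_a/51133913.py | count
-- ===== SOURCE A (Python) =====
-- from itertools import product
--
-- def count(N):
--     N = str(N)
--     n = len(N)
--     dp = [[[[0] * 10 for _ in [0] * 2] for _ in [0] * (n + 1)] for _ in [0] * 2]
--
--     dp[1][0][0][0] = 1
--
--     for i, lz, smaller, j in product(range(n), (0, 1), (0, 1), range(10)):
--         max_d = 9 if smaller else int(N[i])
--         for x in range(max_d + 1):
--             lz2 = lz
--             if x != 0:
--                 lz2 = 0
--             if x != j: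
--                 dp[lz2][i + 1][smaller or x < max_d][x] += dp[lz][i][smaller][j]
--             elif lz2 == 1:
--                 dp[lz2][i + 1][smaller or x < max_d][x] += dp[lz][i][smaller][j]
--     return sum(dp[0][-1][1]) + sum(dp[0][-1][0])
-- ===== SOURCE B (Python) =====
-- def count(N):
--     # Backward digit DP: g[(lz, smaller, prev)] = number of accepted ways to
--     # fill positions i..n-1 from that state; answer is the initial state's value.
--     ds = [int(c) for c in str(N)]
--     g = {(lz, smaller, prev): 1 - lz
--          for lz in (0, 1) for smaller in (0, 1) for prev in range(10)}
--     for d in reversed(ds):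
--         h = {}
--         for lz in (0, 1):
--             for smaller in (0, 1):
--                 hi = 9 if smaller else d
--                 for prev in range(10):
--                     total = 0
--                     for x in range(hi + 1):
--                         lz2 = lz if x == 0 else 0
--                         if x != prev or lz2 == 1:
--                             total += g[(lz2, 1 if (smaller or x < hi) else 0, x)]
--                     h[(lz, smaller, prev)] = total
--         g = h
--     return g[(1, 0, 0)]
-- ===== Notes on version B (the rewrite author's own statement) =====
-- stated objective: alternative
-- what changed: A fills a forward 4-D dp table over all positions and sums the accepting layer; B runs the DP backwards, maintaining only a value function g[(lz, smaller, prev)] = number of accepted completions, folded from the last digit to the first, and reads the answer at the single initial state.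
import Mathlib
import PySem

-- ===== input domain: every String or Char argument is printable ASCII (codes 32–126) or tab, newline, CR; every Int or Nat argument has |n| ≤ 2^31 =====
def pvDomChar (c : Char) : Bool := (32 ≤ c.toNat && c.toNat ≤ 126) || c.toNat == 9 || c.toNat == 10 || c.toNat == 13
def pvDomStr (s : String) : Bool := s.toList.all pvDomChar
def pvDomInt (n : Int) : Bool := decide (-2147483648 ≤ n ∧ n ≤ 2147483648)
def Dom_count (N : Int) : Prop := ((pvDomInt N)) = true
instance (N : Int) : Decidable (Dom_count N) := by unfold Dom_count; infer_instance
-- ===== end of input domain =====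

-- B rewrites A's forward 4-D-table digit DP as a backward digit DP (a value function of
-- the state, pulled from the last digit to the first; the answer is read off at the
-- initial state) — objective: alternative decomposition, similar cost.

-- ===== PORT A =====
-- int(one-char string); total form of PySem.Int.ofChars?, exact under Pre_ (the char is a digit)
def c2i (c : Char) : Int := (PySem.Int.ofChars? [c]).getD 0

-- the zero-initialised 4-D list dp[lz][i][smaller][j] is ported as a finite map from index
-- tuples (absent entry = 0); 'dp[t] += dp[s0]' is the in-place modification aUpd
def aUpd (dp : PySem.Dict (Int × Int × Int × Int) Int) (t s0 : Int × Int × Int × Int) :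
    PySem.Dict (Int × Int × Int × Int) Int :=
  dp.modify t 0 (fun w => w + dp.getD s0 0)

-- the inner 'for x in range(max_d + 1)' loop of A
def aInner (max_d lz i smaller j : Int) (dp : PySem.Dict (Int × Int × Int × Int) Int) :
    PySem.Dict (Int × Int × Int × Int) Int :=
  (PySem.List.pyRange 0 (max_d + 1) 1).foldl (fun dp x =>
    let lz2 : Int := if x ≠ 0 then 0 else lz
    let sm2 : Int := if smaller ≠ 0 then smaller else if x < max_d then 1 else 0
    if x ≠ j then aUpd dp (lz2, i + 1, sm2, x) (lz, i, smaller, j)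
    else if lz2 = 1 then aUpd dp (lz2, i + 1, sm2, x) (lz, i, smaller, j)
    else dp) dp

-- itertools.product(range(n), (0,1), (0,1), range(10)) in its iteration order
def aGroups (n : Int) : List (Int × Int × Int × Int) :=
  (PySem.List.pyRange 0 n 1).flatMap (fun i =>
    [(0 : Int), 1].flatMap (fun lz =>
      [(0 : Int), 1].flatMap (fun smaller =>
        (PySem.List.pyRange 0 10 1).map (fun j => (i, lz, smaller, j)))))

def count (N : Int) : Int :=
  let cs := PySem.Int.toChars N           -- N = str(N)
  let n : Int := PySem.List.len cs
  let dp := (aGroups n).foldl (fun dp it =>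
      match it with
      | (i, lz, smaller, j) =>
        aInner (if smaller ≠ 0 then 9 else c2i (PySem.List.pyGetD cs i ' ')) lz i smaller j dp)
    (PySem.Dict.empty.insert ((1 : Int), (0 : Int), (0 : Int), (0 : Int)) 1)  -- dp[1][0][0][0] = 1
  ((PySem.List.pyRange 0 10 1).map (fun j => dp.getD (0, n, 1, j) 0)).sum
    + ((PySem.List.pyRange 0 10 1).map (fun j => dp.getD (0, n, 0, j) 0)).sum

-- ===== PORT B =====
-- B's value functions g/h are Python dicts keyed by (lz, smaller, prev); each layer is the
-- dict comprehension built in Python's iteration order, folded from the last digit backwards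
def count_alt (N : Int) : Int :=
  let ds := (PySem.Int.toChars N).map c2i        -- ds = [int(c) for c in str(N)]
  let g0 : PySem.Dict (Int × Int × Int) Int := PySem.Dict.ofList
    ([(0 : Int), 1].flatMap (fun lz => [(0 : Int), 1].flatMap (fun smaller =>
      (PySem.List.pyRange 0 10 1).map (fun prev => ((lz, smaller, prev), 1 - lz)))))
  let g := ds.reverse.foldl (fun g d =>
    PySem.Dict.ofList
      ([(0 : Int), 1].flatMap (fun lz => [(0 : Int), 1].flatMap (fun smaller =>
        let hi : Int := if smaller ≠ 0 then 9 else d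
        (PySem.List.pyRange 0 10 1).map (fun prev =>
          ((lz, smaller, prev),
            (PySem.List.pyRange 0 (hi + 1) 1).foldl (fun total x =>
              let lz2 : Int := if x = 0 then lz else 0
              if x ≠ prev ∨ lz2 = 1 then
                total + g.getD (lz2, (if smaller ≠ 0 ∨ x < hi then 1 else 0), x) 0
              else total) 0)))))) g0
  g.getD (1, 0, 0) 0

-- ===== PRECONDITION & SPEC =====
-- Pre_ excludes negative N, on which both Pythons raise ValueError (int('-') inside the digit loop).
def Pre_count (N : Int) : Prop := 0 ≤ N
instance (N : Int) : Decidable (Pre_count N) := by unfold Pre_count; infer_instance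
def pvWitness_count : Int := (2024)

def Spec_count (N : Int) (out : Int) : Prop := out = count_alt N
instance (N : Int) (out : Int) : Decidable (Spec_count N out) := by unfold Spec_count; infer_instance

-- ===== CLAIM (what is proved, stated in full; the proofs are below) =====
def Claim_equal_count : Prop := ∀ (N : Int), Dom_count N → Pre_count N → Spec_count N (count N)

-- ===== LEMMAS AND PROOFS =====

-- proof-side function view of A's dp map
def aUpdF (dp : Int × Int × Int × Int → Int) (t s0 : Int × Int × Int × Int) :
    Int × Int × Int × Int → Int :=
  let v := dp t + dp s0
  fun s => if s = t then v else dp s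

def aInnerF (max_d lz i smaller j : Int) (dp : Int × Int × Int × Int → Int) :
    Int × Int × Int × Int → Int :=
  (PySem.List.pyRange 0 (max_d + 1) 1).foldl (fun dp x =>
    let lz2 : Int := if x ≠ 0 then 0 else lz
    let sm2 : Int := if smaller ≠ 0 then smaller else if x < max_d then 1 else 0
    if x ≠ j then aUpdF dp (lz2, i + 1, sm2, x) (lz, i, smaller, j)
    else if lz2 = 1 then aUpdF dp (lz2, i + 1, sm2, x) (lz, i, smaller, j)
    else dp) dp

def dfun (d : PySem.Dict (Int × Int × Int × Int) Int) : Int × Int × Int × Int → Int :=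
  fun s => d.getD s 0

theorem dfun_aUpd (d : PySem.Dict (Int × Int × Int × Int) Int) (t s0 : Int × Int × Int × Int) :
    dfun (aUpd d t s0) = aUpdF (dfun d) t s0 := by
  funext s
  simp [dfun, aUpd, aUpdF, PySem.Dict.getD_modify]

theorem dfun_aInner (md lz i sm j : Int) (d : PySem.Dict (Int × Int × Int × Int) Int) :
    dfun (aInner md lz i sm j d) = aInnerF md lz i sm j (dfun d) := by
  unfold aInner aInnerF
  symm
  refine List.foldl_hom dfun ?_
  intro d x
  dsimp only
  by_cases h1 : x ≠ j
  · simp only [if_pos h1]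
    rw [dfun_aUpd]
  · simp only [if_neg h1]
    by_cases h2 : (if x ≠ 0 then (0 : Int) else lz) = 1
    · simp only [if_pos h2]
      rw [dfun_aUpd]
    · simp only [if_neg h2]

theorem dfun_init :
    dfun (PySem.Dict.empty.insert ((1 : Int), (0 : Int), (0 : Int), (0 : Int)) 1)
      = fun s => if s = ((1 : Int), (0 : Int), (0 : Int), (0 : Int)) then 1 else 0 := by
  funext s
  simp [dfun, PySem.Dict.getD_insert, PySem.Dict.getD_empty]


-- the 40 (lz, smaller, prev) states of one dp layer, in A's iteration order
def gridL : List (Int × Int × Int) :=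
  [(0 : Int), 1].flatMap (fun lz => [(0 : Int), 1].flatMap (fun sm =>
    (PySem.List.pyRange 0 10 1).map (fun j => (lz, sm, j))))

-- the forward/backward pairing: A's layer-k counts weighted by B's value function
def pairSum (dp : Int × Int × Int × Int → Int) (g : Int × Int × Int → Int) (k : Int) : Int :=
  (gridL.map (fun p => dp (p.1, k, p.2.1, p.2.2) * g p)).sum

-- proof-side function view of B's backward step (one dict layer as a function of the state)
def bStep (d : Int) (g : Int × Int × Int → Int) : Int × Int × Int → Int :=
  fun s =>
    match s with
    | (lz, smaller, prev) =>
      let hi : Int := if smaller ≠ 0 then 9 else d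
      (PySem.List.pyRange 0 (hi + 1) 1).foldl (fun total x =>
        let lz2 : Int := if x = 0 then lz else 0
        if x ≠ prev ∨ lz2 = 1 then
          total + g (lz2, (if smaller ≠ 0 ∨ x < hi then 1 else 0), x)
        else total) 0

-- B's value function for a list of remaining bounding digits
def Gfun (l : List Int) : Int × Int × Int → Int := l.foldr bStep (fun s => 1 - s.1)

-- A's step for one whole layer k (all 40 groups), hd = bounding digit at k
def layerF (hd k : Int) (dp : Int × Int × Int × Int → Int) : Int × Int × Int × Int → Int :=
  gridL.foldl (fun dp p => aInnerF (if p.2.1 ≠ 0 then 9 else hd) p.1 k p.2.1 p.2.2 dp) dp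

-- A's dp after processing layers 0..k-1
def dpAt (cs : List Char) (k : Nat) : Int × Int × Int × Int → Int :=
  (PySem.List.pyRange 0 (k : Int) 1).foldl
    (fun dp i => layerF (c2i (PySem.List.pyGetD cs i ' ')) i dp)
    (fun s => if s = ((1 : Int), (0 : Int), (0 : Int), (0 : Int)) then 1 else 0)

theorem char_eq_of_toNat (c d : Char) (h : c.toNat = d.toNat) : c = d := by
  cases c; cases d; simp [Char.toNat] at h ⊢; exact UInt32.toNat_inj.mp h

theorem c2i_digit_bounds (c : Char) (h : c.isDigit) : 0 ≤ c2i c ∧ c2i c ≤ 9 := by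
  have hb : 48 ≤ c.toNat ∧ c.toNat ≤ 57 := by
    simpa only [Char.isDigit, Bool.and_eq_true, decide_eq_true_eq] using h
  have h10 : c.toNat = 48 ∨ c.toNat = 49 ∨ c.toNat = 50 ∨ c.toNat = 51 ∨ c.toNat = 52 ∨
      c.toNat = 53 ∨ c.toNat = 54 ∨ c.toNat = 55 ∨ c.toNat = 56 ∨ c.toNat = 57 := by omega
  rcases h10 with h|h|h|h|h|h|h|h|h|h <;>
    [ (have hc : c = '0' := char_eq_of_toNat _ _ (by rw [h]; rfl));
      (have hc : c = '1' := char_eq_of_toNat _ _ (by rw [h]; rfl));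
      (have hc : c = '2' := char_eq_of_toNat _ _ (by rw [h]; rfl));
      (have hc : c = '3' := char_eq_of_toNat _ _ (by rw [h]; rfl));
      (have hc : c = '4' := char_eq_of_toNat _ _ (by rw [h]; rfl));
      (have hc : c = '5' := char_eq_of_toNat _ _ (by rw [h]; rfl));
      (have hc : c = '6' := char_eq_of_toNat _ _ (by rw [h]; rfl));
      (have hc : c = '7' := char_eq_of_toNat _ _ (by rw [h]; rfl));
      (have hc : c = '8' := char_eq_of_toNat _ _ (by rw [h]; rfl));
      (have hc : c = '9' := char_eq_of_toNat _ _ (by rw [h]; rfl))] <;>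
    subst hc <;> decide

theorem toChars_digits (N : Int) (h : 0 ≤ N) :
    ∀ c ∈ PySem.Int.toChars N, 0 ≤ c2i c ∧ c2i c ≤ 9 := by
  intro c hc
  rw [PySem.Int.toChars, if_neg (by omega)] at hc
  exact c2i_digit_bounds c (Nat.isDigit_of_mem_toDigits (by norm_num) (by norm_num) hc)

theorem sum_map_ite_pick {α : Type} [DecidableEq α] (l : List α) (q : α) (hn : l.Nodup)
    (hq : q ∈ l) (f : α → Int) :
    (l.map (fun p => if p = q then f p else 0)).sum = f q := by
  induction l with
  | nil => cases hq
  | cons a t ih =>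
    simp only [List.map_cons, List.sum_cons]
    rcases List.mem_cons.mp hq with h | h
    · subst h
      have hz : ∀ p ∈ t, (if p = q then f p else 0) = 0 := by
        intro p hp
        have : p ≠ q := by rintro rfl; exact (List.nodup_cons.mp hn).1 hp
        simp [this]
      simp [List.map_congr_left hz]
    · have hna : a ≠ q := by rintro rfl; exact (List.nodup_cons.mp hn).1 h
      simp [hna, ih (List.nodup_cons.mp hn).2 h]

theorem gridL_nodup : gridL.Nodup := by decide

theorem gridL_mem (lz sm x : Int) (h1 : lz = 0 ∨ lz = 1) (h2 : sm = 0 ∨ sm = 1)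
    (h3 : 0 ≤ x) (h4 : x < 10) : (lz, sm, x) ∈ gridL := by
  simp only [gridL, List.mem_flatMap, List.mem_map, PySem.List.mem_pyRange_one]
  exact ⟨lz, by rcases h1 with rfl | rfl <;> simp,
         sm, by rcases h2 with rfl | rfl <;> simp,
         x, ⟨h3, h4⟩, rfl⟩

theorem pairSum_update (dp : Int × Int × Int × Int → Int) (g : Int × Int × Int → Int)
    (k : Int) (t3 : Int × Int × Int) (ht : t3 ∈ gridL) (s0 : Int × Int × Int × Int) :
    pairSum (fun s => if s = (t3.1, k, t3.2.1, t3.2.2) then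
        dp (t3.1, k, t3.2.1, t3.2.2) + dp s0 else dp s) g k
      = pairSum dp g k + dp s0 * g t3 := by
  unfold pairSum
  have hcond : ∀ p : Int × Int × Int,
      ((p.1, k, p.2.1, p.2.2) = (t3.1, k, t3.2.1, t3.2.2)) ↔ p = t3 := by
    intro p; simp [Prod.ext_iff]
  have hterm : ∀ p ∈ gridL,
      (if (p.1, k, p.2.1, p.2.2) = (t3.1, k, t3.2.1, t3.2.2) then
          dp (t3.1, k, t3.2.1, t3.2.2) + dp s0 else dp (p.1, k, p.2.1, p.2.2)) * g p
        = dp (p.1, k, p.2.1, p.2.2) * g p + (if p = t3 then dp s0 * g p else 0) := by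
    intro p _
    by_cases hp : p = t3
    · subst hp; simp; ring
    · rw [if_neg (fun hc => hp ((hcond p).mp hc)), if_neg hp]; ring
  rw [List.map_congr_left hterm, PySem.List.sum_map_add_int,
    sum_map_ite_pick gridL t3 gridL_nodup ht]

theorem pairSum_zero (dp : Int × Int × Int × Int → Int) (g : Int × Int × Int → Int) (k : Int)
    (h : ∀ p : Int × Int × Int, dp (p.1, k, p.2.1, p.2.2) = 0) : pairSum dp g k = 0 := by
  unfold pairSum
  rw [List.map_congr_left (fun p _ => by rw [h p, zero_mul])]
  simp

-- B's inner accumulation as a list sum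
theorem bStep_eq_sum (hd : Int) (g : Int × Int × Int → Int) (lz sm j : Int) :
    bStep hd g (lz, sm, j)
      = ((PySem.List.pyRange 0 ((if sm ≠ 0 then (9 : Int) else hd) + 1) 1).map (fun x =>
          if x ≠ j ∨ (if x = 0 then lz else 0) = 1 then
            g ((if x = 0 then lz else 0), (if sm ≠ 0 ∨ x < (if sm ≠ 0 then (9 : Int) else hd) then 1 else 0), x)
          else 0)).sum := by
  simp only [bStep]
  rw [PySem.List.foldl_congr_mem _ _ (fun total x =>
    total + (if x ≠ j ∨ (if x = 0 then lz else 0) = 1 then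
      g ((if x = 0 then lz else 0),
        (if sm ≠ 0 ∨ x < (if sm ≠ 0 then (9 : Int) else hd) then 1 else 0), x) else 0)) _
    (by
      intro acc x _
      by_cases hC : x ≠ j ∨ (if x = 0 then lz else 0) = 1 <;> simp [hC])]
  rw [PySem.List.foldl_add]
  simp

-- A's inner x-loop over an arbitrary digit list, paired against g
theorem aRun_spec (lz sm j k md : Int) (hlz : lz = 0 ∨ lz = 1) (hsm : sm = 0 ∨ sm = 1)
    (g : Int × Int × Int → Int) :
    ∀ (xs : List Int), (∀ x ∈ xs, 0 ≤ x ∧ x < 10) → ∀ (dp : Int × Int × Int × Int → Int),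
      (∀ s, s.2.1 ≠ k + 1 →
        (xs.foldl (fun dp x =>
          let lz2 : Int := if x ≠ 0 then 0 else lz
          let sm2 : Int := if sm ≠ 0 then sm else if x < md then 1 else 0
          if x ≠ j then aUpdF dp (lz2, k + 1, sm2, x) (lz, k, sm, j)
          else if lz2 = 1 then aUpdF dp (lz2, k + 1, sm2, x) (lz, k, sm, j)
          else dp) dp) s = dp s)
      ∧ pairSum (xs.foldl (fun dp x =>
          let lz2 : Int := if x ≠ 0 then 0 else lz
          let sm2 : Int := if sm ≠ 0 then sm else if x < md then 1 else 0
          if x ≠ j then aUpdF dp (lz2, k + 1, sm2, x) (lz, k, sm, j)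
          else if lz2 = 1 then aUpdF dp (lz2, k + 1, sm2, x) (lz, k, sm, j)
          else dp) dp) g (k + 1)
        = pairSum dp g (k + 1) + dp (lz, k, sm, j) * (xs.map (fun x =>
            if x ≠ j ∨ (if x = 0 then lz else 0) = 1 then
              g ((if x = 0 then lz else 0), (if sm ≠ 0 ∨ x < md then 1 else 0), x)
            else 0)).sum := by
  intro xs
  induction xs with
  | nil => exact fun _ dp => ⟨fun s _ => rfl, by simp⟩
  | cons x xs ih =>
    intro hx dp
    obtain ⟨hx0, hx10⟩ := hx x (by simp)
    have hxs : ∀ y ∈ xs, 0 ≤ y ∧ y < 10 := fun y hy => hx y (by simp [hy])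
    have hlz2 : (if x = 0 then lz else 0) = 0 ∨ (if x = 0 then lz else 0) = 1 := by
      split_ifs
      · exact hlz
      · exact Or.inl rfl
    have hsm2 : (if sm ≠ 0 ∨ x < md then (1 : Int) else 0) = 0
        ∨ (if sm ≠ 0 ∨ x < md then (1 : Int) else 0) = 1 := by
      split_ifs <;> simp
    have hmem : ((if x = 0 then lz else 0), (if sm ≠ 0 ∨ x < md then (1 : Int) else 0), x)
        ∈ gridL := gridL_mem _ _ _ hlz2 hsm2 hx0 hx10
    have hB : (fun dp x =>
          let lz2 : Int := if x ≠ 0 then 0 else lz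
          let sm2 : Int := if sm ≠ 0 then sm else if x < md then 1 else 0
          if x ≠ j then aUpdF dp (lz2, k + 1, sm2, x) (lz, k, sm, j)
          else if lz2 = 1 then aUpdF dp (lz2, k + 1, sm2, x) (lz, k, sm, j)
          else dp) dp x
        = if x ≠ j ∨ (if x = 0 then lz else 0) = 1 then
            aUpdF dp ((if x = 0 then lz else 0), k + 1,
              (if sm ≠ 0 ∨ x < md then 1 else 0), x) (lz, k, sm, j)
          else dp := by
      rcases hsm with rfl | rfl <;> rcases hlz with rfl | rfl <;>
        by_cases hj : x = j <;> by_cases h0 : x = 0 <;> simp [hj, h0]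
    have hoff : ∀ s : Int × Int × Int × Int, s.2.1 ≠ k + 1 →
        (if x ≠ j ∨ (if x = 0 then lz else 0) = 1 then
            aUpdF dp ((if x = 0 then lz else 0), k + 1,
              (if sm ≠ 0 ∨ x < md then 1 else 0), x) (lz, k, sm, j)
          else dp) s = dp s := by
      intro s hs
      by_cases hC : x ≠ j ∨ (if x = 0 then lz else 0) = 1
      · rw [if_pos hC]
        simp only [aUpdF]
        rw [if_neg]
        rintro rfl
        exact hs rfl
      · rw [if_neg hC]
    have hsrc : (lz, k, sm, j).2.1 ≠ k + 1 := by show k ≠ k + 1; omega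
    obtain ⟨ih1, ih2⟩ := ih hxs ((fun dp x =>
          let lz2 : Int := if x ≠ 0 then 0 else lz
          let sm2 : Int := if sm ≠ 0 then sm else if x < md then 1 else 0
          if x ≠ j then aUpdF dp (lz2, k + 1, sm2, x) (lz, k, sm, j)
          else if lz2 = 1 then aUpdF dp (lz2, k + 1, sm2, x) (lz, k, sm, j)
          else dp) dp x)
    rw [List.foldl_cons]
    constructor
    · intro s hs
      rw [ih1 s hs, hB]
      exact hoff s hs
    · rw [ih2]
      conv_lhs => rw [hB]
      rw [show (if x ≠ j ∨ (if x = 0 then lz else 0) = 1 then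
            aUpdF dp ((if x = 0 then lz else 0), k + 1,
              (if sm ≠ 0 ∨ x < md then 1 else 0), x) (lz, k, sm, j)
          else dp) (lz, k, sm, j) = dp (lz, k, sm, j) from hoff _ hsrc]
      by_cases hC : x ≠ j ∨ (if x = 0 then lz else 0) = 1
      · rw [if_pos hC]
        rw [show aUpdF dp ((if x = 0 then lz else 0), k + 1,
              (if sm ≠ 0 ∨ x < md then 1 else 0), x) (lz, k, sm, j)
            = (fun s => if s = (((if x = 0 then lz else 0), (if sm ≠ 0 ∨ x < md then (1:Int) else 0), x).1, k + 1,
                ((if x = 0 then lz else 0), (if sm ≠ 0 ∨ x < md then (1:Int) else 0), x).2.1,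
                ((if x = 0 then lz else 0), (if sm ≠ 0 ∨ x < md then (1:Int) else 0), x).2.2)
              then dp (((if x = 0 then lz else 0), (if sm ≠ 0 ∨ x < md then (1:Int) else 0), x).1, k + 1,
                ((if x = 0 then lz else 0), (if sm ≠ 0 ∨ x < md then (1:Int) else 0), x).2.1,
                ((if x = 0 then lz else 0), (if sm ≠ 0 ∨ x < md then (1:Int) else 0), x).2.2)
                + dp (lz, k, sm, j) else dp s) from rfl]
        rw [pairSum_update dp _ (k + 1) _ hmem (lz, k, sm, j)]
        simp only [List.map_cons, List.sum_cons, if_pos hC]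
        ring
      · rw [if_neg hC]
        simp only [List.map_cons, List.sum_cons, if_neg hC]
        ring

theorem aInnerF_spec (hd lz sm j k : Int) (hlz : lz = 0 ∨ lz = 1) (hsm : sm = 0 ∨ sm = 1)
    (hhd : 0 ≤ hd ∧ hd ≤ 9) (dp : Int × Int × Int × Int → Int) (g : Int × Int × Int → Int) :
    (∀ s, s.2.1 ≠ k + 1 → aInnerF (if sm ≠ 0 then 9 else hd) lz k sm j dp s = dp s)
    ∧ pairSum (aInnerF (if sm ≠ 0 then 9 else hd) lz k sm j dp) g (k + 1)
        = pairSum dp g (k + 1) + dp (lz, k, sm, j) * bStep hd g (lz, sm, j) := by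
  have h := aRun_spec lz sm j k (if sm ≠ 0 then 9 else hd) hlz hsm g
    (PySem.List.pyRange 0 ((if sm ≠ 0 then (9 : Int) else hd) + 1) 1)
    (by
      intro x hxm
      rw [PySem.List.mem_pyRange_one] at hxm
      have : (if sm ≠ 0 then (9 : Int) else hd) ≤ 9 := by split_ifs <;> omega
      omega)
    dp
  refine ⟨h.1, ?_⟩
  unfold aInnerF
  rw [h.2, bStep_eq_sum]

theorem layer_spec (hd k : Int) (hhd : 0 ≤ hd ∧ hd ≤ 9) (g : Int × Int × Int → Int) :
    ∀ (grps : List (Int × Int × Int)),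
      (∀ p ∈ grps, (p.1 = 0 ∨ p.1 = 1) ∧ (p.2.1 = 0 ∨ p.2.1 = 1) ∧ 0 ≤ p.2.2 ∧ p.2.2 < 10) →
      ∀ (dp : Int × Int × Int × Int → Int),
      (∀ s, s.2.1 ≠ k + 1 →
        (grps.foldl (fun dp p => aInnerF (if p.2.1 ≠ 0 then 9 else hd) p.1 k p.2.1 p.2.2 dp) dp) s = dp s)
      ∧ pairSum (grps.foldl (fun dp p => aInnerF (if p.2.1 ≠ 0 then 9 else hd) p.1 k p.2.1 p.2.2 dp) dp) g (k + 1)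
          = pairSum dp g (k + 1)
            + (grps.map (fun p => dp (p.1, k, p.2.1, p.2.2) * bStep hd g p)).sum := by
  intro grps
  induction grps with
  | nil => exact fun _ dp => ⟨fun s _ => rfl, by simp⟩
  | cons p ps ih =>
    intro hg dp
    obtain ⟨hp1, hp2, hp3⟩ := hg p (by simp)
    have hps : ∀ q ∈ ps, (q.1 = 0 ∨ q.1 = 1) ∧ (q.2.1 = 0 ∨ q.2.1 = 1) ∧ 0 ≤ q.2.2 ∧ q.2.2 < 10 :=
      fun q hq => hg q (by simp [hq])
    have hin := aInnerF_spec hd p.1 p.2.1 p.2.2 k hp1 hp2 hhd dp g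
    obtain ⟨ih1, ih2⟩ := ih hps (aInnerF (if p.2.1 ≠ 0 then 9 else hd) p.1 k p.2.1 p.2.2 dp)
    rw [List.foldl_cons]
    constructor
    · intro s hs
      rw [ih1 s hs, hin.1 s hs]
    · rw [ih2, hin.2]
      rw [List.map_congr_left (l := ps) (fun q _ => by
        rw [hin.1 (q.1, k, q.2.1, q.2.2) (by show k ≠ k + 1; omega)])]
      simp only [List.map_cons, List.sum_cons]
      ring

theorem gridL_cond :
    ∀ p ∈ gridL, (p.1 = 0 ∨ p.1 = 1) ∧ (p.2.1 = 0 ∨ p.2.1 = 1) ∧ 0 ≤ p.2.2 ∧ p.2.2 < 10 := by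
  decide

set_option maxHeartbeats 2000000 in
theorem climb (cs : List Char) (hdig : ∀ c ∈ cs, 0 ≤ c2i c ∧ c2i c ≤ 9) :
    ∀ k : Nat, k ≤ cs.length →
      (∀ s : Int × Int × Int × Int, (k : Int) < s.2.1 → dpAt cs k s = 0)
      ∧ pairSum (dpAt cs k) (Gfun ((cs.map c2i).drop k)) k = Gfun (cs.map c2i) (1, 0, 0) := by
  intro k
  induction k with
  | zero =>
    intro _
    have h0 : dpAt cs 0 = fun s => if s = ((1 : Int), (0 : Int), (0 : Int), (0 : Int)) then 1 else 0 := by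
      unfold dpAt
      rw [show ((0 : Nat) : Int) = 0 from rfl, PySem.List.pyRange_one_eq_nil le_rfl]
      rfl
    constructor
    · intro s hs
      rw [h0]
      by_cases h : s = ((1 : Int), (0 : Int), (0 : Int), (0 : Int))
      · exfalso; subst h; simp at hs
      · simp [h]
    · rw [h0, List.drop_zero]
      unfold pairSum
      rw [List.map_congr_left (fun p (_ : p ∈ gridL) => by
        show (if (p.1, (0:Int), p.2.1, p.2.2) = ((1 : Int), (0 : Int), (0 : Int), (0 : Int)) then (1:Int) else 0)
              * Gfun (cs.map c2i) p
            = if p = ((1 : Int), (0 : Int), (0 : Int)) then Gfun (cs.map c2i) p else 0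
        by_cases hp : p = ((1 : Int), (0 : Int), (0 : Int))
        · subst hp; simp
        · rw [if_neg hp, if_neg, zero_mul]
          intro hc
          apply hp
          have := Prod.ext_iff.mp hc
          obtain ⟨h1, h2⟩ := this
          have := Prod.ext_iff.mp h2
          obtain ⟨_, h3⟩ := this
          have := Prod.ext_iff.mp h3
          obtain ⟨h4, h5⟩ := this
          exact Prod.ext h1 (Prod.ext h4 h5))]
      rw [sum_map_ite_pick gridL ((1 : Int), (0 : Int), (0 : Int)) gridL_nodup (by decide)]
  | succ k ih =>
    intro hk1
    have hklt : k < cs.length := by omega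
    obtain ⟨ihZ, ihP⟩ := ih (by omega)
    have hdk : c2i (PySem.List.pyGetD cs (k : Int) ' ') = (cs.map c2i)[k]'(by simpa using hklt) := by
      rw [PySem.List.pyGetD_natCast, List.getD_eq_getElem cs ' ' hklt, List.getElem_map]
    have hdig' : 0 ≤ c2i (PySem.List.pyGetD cs (k : Int) ' ')
        ∧ c2i (PySem.List.pyGetD cs (k : Int) ' ') ≤ 9 := by
      rw [PySem.List.pyGetD_natCast, List.getD_eq_getElem cs ' ' hklt]
      exact hdig _ (List.getElem_mem hklt)
    have hstep : dpAt cs (k + 1)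
        = layerF (c2i (PySem.List.pyGetD cs (k : Int) ' ')) (k : Int) (dpAt cs k) := by
      unfold dpAt
      rw [show ((k + 1 : Nat) : Int) = (k : Int) + 1 by push_cast; ring,
        PySem.List.pyRange_one_succ_right (by omega : (0 : Int) ≤ (k : Int)),
        List.foldl_append]
      rfl
    have hlay := layer_spec (c2i (PySem.List.pyGetD cs (k : Int) ' ')) (k : Int) hdig'
      (Gfun ((cs.map c2i).drop (k + 1))) gridL gridL_cond (dpAt cs k)
    constructor
    · intro s hs
      rw [hstep]
      unfold layerF
      rw [hlay.1 s (by push_cast at hs; omega)]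
      exact ihZ s (by push_cast at hs ⊢; omega)
    · rw [hstep]
      have hcast : ((k + 1 : Nat) : Int) = (k : Int) + 1 := by push_cast; ring
      rw [hcast]
      unfold layerF
      rw [hlay.2]
      rw [pairSum_zero (dpAt cs k) _ ((k : Int) + 1) (fun p => ihZ (p.1, (k : Int) + 1, p.2.1, p.2.2) (by show (k : Int) < (k : Int) + 1; omega))]
      rw [zero_add]
      have hGdrop : bStep (c2i (PySem.List.pyGetD cs (k : Int) ' '))
            (Gfun ((cs.map c2i).drop (k + 1)))
          = Gfun ((cs.map c2i).drop k) := by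
        rw [hdk]
        conv_rhs => rw [List.drop_eq_getElem_cons (show k < (cs.map c2i).length by simpa using hklt)]
        rfl
      rw [show (gridL.map (fun p => dpAt cs k (p.1, (k : Int), p.2.1, p.2.2)
            * bStep (c2i (PySem.List.pyGetD cs (k : Int) ' '))
              (Gfun ((cs.map c2i).drop (k + 1))) p)).sum
          = pairSum (dpAt cs k)
              (bStep (c2i (PySem.List.pyGetD cs (k : Int) ' '))
                (Gfun ((cs.map c2i).drop (k + 1)))) (k : Int) from rfl]
      rw [hGdrop]
      exact ihP

theorem pyR10 : PySem.List.pyRange 0 10 1 = [0, 1, 2, 3, 4, 5, 6, 7, 8, 9] := by decide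

theorem final_sum (dp : Int × Int × Int × Int → Int) (k : Int) :
    pairSum dp (fun s => 1 - s.1) k
      = ((PySem.List.pyRange 0 10 1).map (fun j => dp (0, k, 1, j))).sum
        + ((PySem.List.pyRange 0 10 1).map (fun j => dp (0, k, 0, j))).sum := by
  unfold pairSum gridL
  rw [pyR10]
  simp only [List.flatMap_cons, List.flatMap_nil, List.map_cons, List.map_nil,
    List.map_append, List.sum_append, List.append_nil, List.sum_cons, List.sum_nil]
  ring

theorem count_eq_pair (N : Int) :
    count N = pairSum (dpAt (PySem.Int.toChars N) (PySem.Int.toChars N).length)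
      (fun s => 1 - s.1) ((PySem.Int.toChars N).length : Int) := by
  rw [final_sum]
  unfold count
  simp only [PySem.List.len_eq]
  have hD : dfun ((aGroups (((PySem.Int.toChars N).length : Int))).foldl
      (fun dp it => match it with
        | (i, lz, smaller, j) =>
          aInner (if smaller ≠ 0 then 9 else c2i (PySem.List.pyGetD (PySem.Int.toChars N) i ' '))
            lz i smaller j dp)
      (PySem.Dict.empty.insert ((1 : Int), (0 : Int), (0 : Int), (0 : Int)) 1))
      = dpAt (PySem.Int.toChars N) (PySem.Int.toChars N).length := by
    rw [show aGroups (((PySem.Int.toChars N).length : Int))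
        = (PySem.List.pyRange 0 ((PySem.Int.toChars N).length : Int) 1).flatMap
            (fun i => gridL.map fun p => (i, p.1, p.2.1, p.2.2)) from rfl]
    rw [List.foldl_flatMap]
    unfold dpAt
    rw [← dfun_init]
    symm
    refine List.foldl_hom dfun (fun d i => ?_)
    rw [List.foldl_map]
    unfold layerF
    exact List.foldl_hom dfun (fun d p => by rw [dfun_aInner])
  have hGet : ∀ s : Int × Int × Int × Int,
      ((aGroups (((PySem.Int.toChars N).length : Int))).foldl
        (fun dp it => match it with
          | (i, lz, smaller, j) =>
            aInner (if smaller ≠ 0 then 9 else c2i (PySem.List.pyGetD (PySem.Int.toChars N) i ' '))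
              lz i smaller j dp)
        (PySem.Dict.empty.insert ((1 : Int), (0 : Int), (0 : Int), (0 : Int)) 1)).getD s 0
      = dpAt (PySem.Int.toChars N) (PySem.Int.toChars N).length s :=
    fun s => congrFun hD s
  simp only [hGet]

-- function view of B's dicts
def gfun (g : PySem.Dict (Int × Int × Int) Int) : Int × Int × Int → Int := fun s => g.getD s 0

-- the value B's layer comprehension stores at state p
def valB (d : Int) (g : PySem.Dict (Int × Int × Int) Int) (p : Int × Int × Int) : Int :=
  (PySem.List.pyRange 0 ((if p.2.1 ≠ 0 then (9 : Int) else d) + 1) 1).foldl (fun total x =>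
    let lz2 : Int := if x = 0 then p.1 else 0
    if x ≠ p.2.2 ∨ lz2 = 1 then
      total + g.getD (lz2,
        (if p.2.1 ≠ 0 ∨ x < (if p.2.1 ≠ 0 then (9 : Int) else d) then 1 else 0), x) 0
    else total) 0

def layerB (d : Int) (g : PySem.Dict (Int × Int × Int) Int) :
    PySem.Dict (Int × Int × Int) Int :=
  PySem.Dict.ofList (gridL.map (fun p => (p, valB d g p)))

theorem getD_gridMap (f : Int × Int × Int → Int) (p : Int × Int × Int) (hp : p ∈ gridL) :
    (PySem.Dict.ofList (gridL.map (fun q => (q, f q)))).getD p 0 = f p := by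
  rw [show PySem.Dict.ofList (gridL.map (fun q => (q, f q)))
      = (gridL.map (fun q => (q, f q))).foldl (fun dct kv => dct.insert kv.1 kv.2)
          PySem.Dict.empty from rfl,
    List.foldl_map]
  have hit : (gridL.foldl (fun dct q => dct.insert q (f q)) PySem.Dict.empty).items
      = PySem.Dict.empty.items ++ gridL.map (fun q => (q, f q)) :=
    PySem.Dict.items_foldl_insert_fresh gridL (fun q => q) f _
      (fun a _ => PySem.Dict.contains_empty a) (by simpa using gridL_nodup)
  refine PySem.Dict.getD_of_mem_items _ ?_ ?_ 0
  · rw [hit]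
    exact List.mem_append.mpr (Or.inr (List.mem_map.mpr ⟨p, hp, rfl⟩))
  · exact PySem.Dict.nodup_keys_foldl_insert gridL (fun _ q => f q) _ (by simp)

theorem valB_eq_bStep (d : Int) (g : PySem.Dict (Int × Int × Int) Int)
    (gF : Int × Int × Int → Int) (hagree : ∀ s ∈ gridL, gfun g s = gF s)
    (hd9 : 0 ≤ d ∧ d ≤ 9) (p : Int × Int × Int) (hp : p ∈ gridL) :
    valB d g p = bStep d gF p := by
  obtain ⟨hp1, hp2, hp3, hp4⟩ := gridL_cond p hp
  obtain ⟨lz, sm, prev⟩ := p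
  unfold valB bStep
  dsimp only at hp1 hp2 hp3 hp4 ⊢
  refine PySem.List.foldl_congr_mem _ _ _ _ ?_
  intro total x hx
  rw [PySem.List.mem_pyRange_one] at hx
  have hx9 : x < 10 := by
    have : (if sm ≠ 0 then (9 : Int) else d) ≤ 9 := by split_ifs <;> omega
    omega
  have hmem : ((if x = 0 then lz else 0),
      (if sm ≠ 0 ∨ x < (if sm ≠ 0 then (9 : Int) else d) then (1 : Int) else 0), x) ∈ gridL := by
    refine gridL_mem _ _ _ ?_ ?_ hx.1 hx9
    · split_ifs
      · exact hp1
      · exact Or.inl rfl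
    · split_ifs <;> simp
  by_cases hC : x ≠ prev ∨ (if x = 0 then lz else 0) = 1
  · simp only [if_pos hC]
    rw [show g.getD ((if x = 0 then lz else 0),
        (if sm ≠ 0 ∨ x < (if sm ≠ 0 then (9 : Int) else d) then (1 : Int) else 0), x) 0
      = gfun g ((if x = 0 then lz else 0),
        (if sm ≠ 0 ∨ x < (if sm ≠ 0 then (9 : Int) else d) then (1 : Int) else 0), x) from rfl,
      hagree _ hmem]
  · simp only [if_neg hC]

theorem foldB (l : List Int) (hb : ∀ d ∈ l, 0 ≤ d ∧ d ≤ 9) :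
    ∀ (gD : PySem.Dict (Int × Int × Int) Int) (gF : Int × Int × Int → Int),
      (∀ s ∈ gridL, gfun gD s = gF s) →
      ∀ s ∈ gridL, gfun (l.foldl (fun g d => layerB d g) gD) s
        = (l.foldl (fun g d => bStep d g) gF) s := by
  induction l with
  | nil => exact fun gD gF h s hs => h s hs
  | cons d t ih =>
    intro gD gF h s hs
    simp only [List.foldl_cons]
    refine ih (fun e he => hb e (by simp [he])) _ _ ?_ s hs
    intro q hq
    rw [show gfun (layerB d gD) q = valB d gD q from getD_gridMap (valB d gD) q hq]
    exact valB_eq_bStep d gD gF h (hb d (by simp)) q hq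

theorem count_alt_eq_G (N : Int)
    (hdig : ∀ c ∈ PySem.Int.toChars N, 0 ≤ c2i c ∧ c2i c ≤ 9) :
    count_alt N = Gfun ((PySem.Int.toChars N).map c2i) (1, 0, 0) := by
  have hport : count_alt N
      = gfun ((((PySem.Int.toChars N).map c2i).reverse).foldl (fun g d => layerB d g)
          (PySem.Dict.ofList (gridL.map (fun q => (q, 1 - q.1))))) (1, 0, 0) := rfl
  rw [hport]
  rw [foldB (((PySem.Int.toChars N).map c2i).reverse)
    (by
      intro e he
      rw [List.mem_reverse, List.mem_map] at he
      obtain ⟨c, hc, rfl⟩ := he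
      exact hdig c hc)
    _ (fun s => 1 - s.1)
    (fun q hq => getD_gridMap (fun q => 1 - q.1) q hq)
    (1, 0, 0) (by decide)]
  rw [List.foldl_reverse]
  rfl

-- ===== VERDICT (by name: the statement is the Claim_ definition above) =====
theorem count_spec : Claim_equal_count := by
  intro N _ hpre
  unfold Spec_count
  have hdig := toChars_digits N hpre
  have h := climb (PySem.Int.toChars N) hdig (PySem.Int.toChars N).length le_rfl
  rw [count_eq_pair, count_alt_eq_G N hdig]
  have hdrop : ((PySem.Int.toChars N).map c2i).drop (PySem.Int.toChars N).length = [] := by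
    simp
  rw [hdrop] at h
  exact h.2
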